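-- pv_equiv track=rewrite | github.com/swylab/programmers_study | 프로그래머스/0/181906. 접두사인지 확인하기/접두사인지 확인하기.py | solution
-- ===== SOURCE A (Python) =====
-- def solution(my_string, is_prefix):
--     all_prefix = []
--     for i in range(len(my_string)):
--         all_prefix.append(my_string[:i])
--     if is_prefix in all_prefix:
--         return 1
--     else:
--         return 0
-- ===== SOURCE B (Python) =====
-- def solution(my_string, is_prefix):
--     if len(is_prefix) >= len(my_string):
--         return 0
--     for a, b in zip(is_prefix, my_string):
--         if a != b:
--             return 0
--     return 1
-- ===== Notes on version B (the rewrite author's own statement) =====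
-- stated objective: faster
-- what changed: Replaced building the list of all proper prefixes and testing membership with a length guard plus one direct character-by-character comparison over zip(is_prefix, my_string).
import Mathlib
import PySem

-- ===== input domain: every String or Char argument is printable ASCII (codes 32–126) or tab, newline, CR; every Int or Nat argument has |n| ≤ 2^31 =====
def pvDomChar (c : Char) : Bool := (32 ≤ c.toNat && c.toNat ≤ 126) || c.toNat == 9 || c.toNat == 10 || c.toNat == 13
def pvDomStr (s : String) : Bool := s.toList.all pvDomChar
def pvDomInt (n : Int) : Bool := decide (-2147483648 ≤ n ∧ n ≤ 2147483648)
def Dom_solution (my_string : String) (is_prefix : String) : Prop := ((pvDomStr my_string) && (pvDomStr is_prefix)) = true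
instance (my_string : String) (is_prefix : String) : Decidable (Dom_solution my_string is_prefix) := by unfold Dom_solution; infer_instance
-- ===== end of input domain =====

-- B drops A's list of all proper prefixes and does a length guard plus one direct character comparison pass (faster).

-- ===== PORT A =====
-- builds all_prefix = [my_string[:i] for i in range(len(my_string))], then membership test
def solution (my_string : String) (is_prefix : String) : Int :=
  let all_prefix :=
    (PySem.List.pyRange 0 (PySem.Str.len my_string) 1).foldl
      (fun acc i => acc ++ [PySem.Str.slice my_string none (some i)]) []
  if is_prefix ∈ all_prefix then 1 else 0

-- ===== PORT B =====
-- the 'for a, b in zip(is_prefix, my_string): if a != b: return 0' loop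
def pvCheckPairs : List (Char × Char) → Int
  | [] => 1
  | (a, b) :: rest => if a ≠ b then 0 else pvCheckPairs rest

def solution_alt (my_string : String) (is_prefix : String) : Int :=
  if PySem.Str.len is_prefix ≥ PySem.Str.len my_string then 0
  else pvCheckPairs (is_prefix.toList.zip my_string.toList)

-- ===== PRECONDITION & SPEC =====
def Spec_solution (my_string : String) (is_prefix : String) (out : Int) : Prop := out = solution_alt my_string is_prefix
instance (my_string : String) (is_prefix : String) (out : Int) : Decidable (Spec_solution my_string is_prefix out) := by unfold Spec_solution; infer_instance

-- ===== CLAIM (what is proved, stated in full; the proofs are below) =====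
def Claim_equal_solution : Prop := ∀ (my_string : String) (is_prefix : String), Dom_solution my_string is_prefix → Spec_solution my_string is_prefix (solution my_string is_prefix)

-- ===== LEMMAS AND PROOFS =====

-- A's membership test holds exactly when is_prefix is a strictly shorter prefix of my_string
theorem solution_mem_iff (ms ip : String) :
    (ip ∈ (PySem.List.pyRange 0 (PySem.Str.len ms) 1).map
        (fun i => PySem.Str.slice ms none (some i)))
    ↔ (ip.toList.length < ms.toList.length ∧ ip.toList <+: ms.toList) := by
  rw [List.mem_map]
  constructor
  · rintro ⟨i, hi, hslice⟩
    rw [PySem.List.mem_pyRange_one] at hi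
    have h0 : (0:Int) ≤ i := hi.1
    have hlt : i < PySem.Str.len ms := hi.2
    rw [PySem.Str.len_eq] at hlt
    have htn : i.toNat < ms.toList.length := by omega
    have hl : ip.toList = ms.toList.take i.toNat := by
      rw [← hslice]; simp [PySem.Str.slice]; rw [PySem.List.slice_to _ h0]
    have hlen : ip.toList.length = i.toNat := by
      rw [hl, List.length_take]; omega
    refine ⟨by omega, ?_⟩
    rw [List.prefix_iff_eq_take, hlen, ← hl]
  · rintro ⟨hlen, hpre⟩
    refine ⟨(ip.toList.length : Int), ?_, ?_⟩
    · rw [PySem.List.mem_pyRange_one, PySem.Str.len_eq]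
      constructor <;> omega
    · apply String.toList_inj.mp
      simp [PySem.Str.slice]
      rw [List.prefix_iff_eq_take] at hpre
      simpa using hpre.symm

-- B's zip loop decides the prefix relation when is_prefix is not longer
theorem pvCheckPairs_eq (xs ys : List Char) (h : xs.length ≤ ys.length) :
    pvCheckPairs (xs.zip ys) = if xs <+: ys then 1 else 0 := by
  induction xs generalizing ys with
  | nil => simp [pvCheckPairs]
  | cons a xs' ih =>
    cases ys with
    | nil => simp at h
    | cons b ys' =>
      simp only [List.zip_cons_cons, pvCheckPairs, List.cons_prefix_cons]
      by_cases hab : a = b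
      · simp [hab, ih ys' (by simpa using h)]
      · simp [hab]

-- ===== VERDICT (by name: the statement is the Claim_ definition above) =====
theorem solution_spec : Claim_equal_solution := by
  intro ms ip _
  unfold Spec_solution solution solution_alt
  simp only [PySem.List.foldl_append_singleton_eq_map, List.nil_append]
  by_cases hge : PySem.Str.len ip ≥ PySem.Str.len ms
  · rw [if_pos hge, if_neg]
    rw [solution_mem_iff]
    rw [PySem.Str.len_eq, PySem.Str.len_eq] at hge
    rintro ⟨hlt, -⟩
    omega
  · rw [if_neg hge]
    have hlt : ip.toList.length < ms.toList.length := by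
      rw [PySem.Str.len_eq, PySem.Str.len_eq] at hge; omega
    rw [pvCheckPairs_eq _ _ (le_of_lt hlt)]
    by_cases hp : ip.toList <+: ms.toList
    · rw [if_pos hp, if_pos]
      rw [solution_mem_iff]; exact ⟨hlt, hp⟩
    · rw [if_neg hp, if_neg]
      rw [solution_mem_iff]
      rintro ⟨-, h⟩; exact hp h
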